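-- pv_equiv track=rewrite | github.com/pypi-data/pypi-mirror-386 | packages/lumeo/lumeo-0.1.36.tar.gz/lumeo-0.1.36/src/lumeo/scripts/hikcentral/import_cameras.py | build_region_hierarchy
-- ===== SOURCE A (Python) =====
-- def build_region_hierarchy(regions):
--     """
--     Build a hierarchy of regions and return a mapping of region codes to full paths
--     """
--     region_map = {region['indexCode']: region for region in regions}
--     region_paths = {}
--
--     def get_region_path(region_code):
--         if region_code in region_paths:
--             return region_paths[region_code]
--
--         region = region_map.get(region_code)
--         if not region:
--             return ""
--
--         parent_code = region.get('parentIndexCode')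
--         sanitized_name = region['name'].replace('/', '_')
--         if parent_code == '-1' or not parent_code or parent_code == region_code:
--             path = sanitized_name
--         else:
--             parent_path = get_region_path(parent_code)
--             path = f"{parent_path}/{sanitized_name}" if parent_path else sanitized_name
--
--         region_paths[region_code] = path
--         return path
--
--     # Build paths for all regions
--     for region in regions:
--         get_region_path(region['indexCode'])
--
--     return region_paths
-- ===== SOURCE B (Python) =====
-- def build_region_hierarchy(regions):
--     """
--     Build a hierarchy of regions and return a mapping of region codes to full paths
--     """
--     region_map = {region['indexCode']: region for region in regions}
--     region_paths = {}
--
--     for region in regions: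
--         code = region['indexCode']
--         if code in region_paths:
--             continue
--         # walk upward, collecting the chain of not-yet-resolved codes (child first)
--         chain = []
--         cur = code
--         while True:
--             chain.append(cur)
--             parent = region_map[cur].get('parentIndexCode')
--             if parent == '-1' or not parent or parent == cur:
--                 base = ""
--                 break
--             if parent in region_paths:
--                 base = region_paths[parent]
--                 break
--             if parent not in region_map:
--                 base = ""
--                 break
--             if parent in chain:  # cycle guard
--                 base = ""
--                 break
--             cur = parent
--         # unwind: resolve paths top-down
--         for c in reversed(chain):
--             name = region_map[c]['name'].replace('/', '_')
--             base = f"{base}/{name}" if base else name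
--             region_paths[c] = base
--
--     return region_paths
-- ===== Notes on version B (the rewrite author's own statement) =====
-- stated objective: alternative
-- what changed: Replaces the memoized recursive path helper by an explicit per-region upward walk: collect the chain of unresolved ancestor codes child-first (with a visited guard instead of unbounded recursion), then unwind it top-down, inserting each path directly.
import Mathlib
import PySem

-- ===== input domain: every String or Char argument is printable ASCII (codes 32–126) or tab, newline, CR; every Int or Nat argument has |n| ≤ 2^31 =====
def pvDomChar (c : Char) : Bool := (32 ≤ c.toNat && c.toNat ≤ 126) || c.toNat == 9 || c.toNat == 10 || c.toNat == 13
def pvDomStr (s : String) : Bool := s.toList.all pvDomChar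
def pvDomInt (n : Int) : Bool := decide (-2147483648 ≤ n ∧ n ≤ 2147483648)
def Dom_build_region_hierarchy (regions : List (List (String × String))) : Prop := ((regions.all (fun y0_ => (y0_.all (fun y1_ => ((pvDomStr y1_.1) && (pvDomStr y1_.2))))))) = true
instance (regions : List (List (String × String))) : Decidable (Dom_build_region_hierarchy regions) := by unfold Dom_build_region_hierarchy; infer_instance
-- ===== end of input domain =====

-- B replaces A's memoized recursive helper by an explicit per-region upward walk (collect the
-- unresolved ancestor chain child-first, then unwind it top-down); same return value, no speed claim.

-- ===== PORT A =====
-- a region dict is given as an assoc list; Python builds a dict from it, so lookups are last-wins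
def pvRGet (r : List (String × String)) (k : String) : Option String :=
  (PySem.Dict.ofList r).get? k

-- region_map = {region['indexCode']: region for region in regions}  (KeyError on a missing
-- 'indexCode' is excluded by Pre_; the .getD "" default is unreachable there)
def pvRegionMap (regions : List (List (String × String))) :
    PySem.Dict String (List (String × String)) :=
  regions.foldl (fun m r => m.insert ((pvRGet r "indexCode").getD "") r) PySem.Dict.empty

-- get_region_path, literally; fuel only makes the recursion total (under Pre_ the parent chains
-- are acyclic, so regions.length + 1 fuel is never exhausted); region['name'] KeyError excluded by Pre_
def pvGetPath (rmap : PySem.Dict String (List (String × String))) :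
    Nat → String → PySem.Dict String String → String × PySem.Dict String String
  | 0, _, paths => ("", paths)
  | fuel+1, code, paths =>
    match paths.get? code with
    | some p => (p, paths)
    | none =>
      match rmap.get? code with
      | none => ("", paths)
      | some r =>
        if r.isEmpty then ("", paths)  -- 'if not region:' (an empty dict is falsy)
        else
          let parent := pvRGet r "parentIndexCode"
          let name := PySem.Str.replace ((pvRGet r "name").getD "") "/" "_"
          if parent = some "-1" ∨ parent = none ∨ parent = some "" ∨ parent = some code then
            (name, paths.insert code name)
          else
            let pr := pvGetPath rmap fuel (parent.getD "") paths
            let path := if pr.1 ≠ "" then pr.1 ++ "/" ++ name else name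
            (path, pr.2.insert code path)

def build_region_hierarchy (regions : List (List (String × String))) : List (String × String) :=
  let rmap := pvRegionMap regions
  (regions.foldl
    (fun paths r => (pvGetPath rmap (regions.length + 1) ((pvRGet r "indexCode").getD "") paths).2)
    PySem.Dict.empty).items

-- ===== PORT B =====
-- the upward while-True walk of Source B; fuel only makes the loop total (the visited guard bounds the
-- chain by the number of map keys, so regions.length + 1 fuel is never exhausted)
def pvWalk (rmap : PySem.Dict String (List (String × String))) :
    Nat → String → List String → PySem.Dict String String → List String × String
  | 0, _, chain0, _ => (chain0, "")
  | fuel+1, cur, chain0, paths =>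
    let chain := chain0 ++ [cur]
    match rmap.get? cur with
    | none => (chain, "")  -- unreachable: every walked code is a key of region_map
    | some r =>
      match pvRGet r "parentIndexCode" with
      | none => (chain, "")
      | some p =>
        if p = "-1" ∨ p = "" ∨ p = cur then (chain, "")
        else
          match paths.get? p with
          | some bp => (chain, bp)
          | none =>
            if rmap.get? p = none then (chain, "")
            else if p ∈ chain then (chain, "")  -- cycle guard
            else pvWalk rmap fuel p chain paths

-- one step of Source B's unwind loop: base = f"{base}/{name}" if base else name; region_paths[c] = base
def pvUnwindStep (rmap : PySem.Dict String (List (String × String)))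
    (acc : String × PySem.Dict String String) (c : String) :
    String × PySem.Dict String String :=
  let name := PySem.Str.replace ((pvRGet ((rmap.get? c).getD []) "name").getD "") "/" "_"
  let b := if acc.1 ≠ "" then acc.1 ++ "/" ++ name else name
  (b, acc.2.insert c b)

def build_region_hierarchy_alt (regions : List (List (String × String))) : List (String × String) :=
  let rmap := pvRegionMap regions
  (regions.foldl
    (fun paths r =>
      let code := (pvRGet r "indexCode").getD ""
      match paths.get? code with
      | some _ => paths
      | none =>
        let wb := pvWalk rmap (regions.length + 1) code [] paths
        (wb.1.reverse.foldl (pvUnwindStep rmap) (wb.2, paths)).2)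
    PySem.Dict.empty).items

-- ===== PRECONDITION & SPEC =====
-- the parent-pointer step of the region graph: the parent's code, when the chain continues there
def pvStep (rmap : PySem.Dict String (List (String × String))) (c : String) : Option String :=
  match rmap.get? c with
  | none => none
  | some r =>
    match pvRGet r "parentIndexCode" with
    | none => none
    | some p => if p = "-1" ∨ p = "" ∨ p = c ∨ rmap.get? p = none then none else some p

-- the parent chain from c reaches a root within f steps (the step is deterministic, so reaching
-- a root at all means the chain never revisits a code)
def pvReachesRoot (rmap : PySem.Dict String (List (String × String))) : Nat → String → Bool
  | 0, _ => false
  | f+1, c =>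
    match pvStep rmap c with
    | none => true
    | some p => pvReachesRoot rmap f p

-- exactly the inputs on which the Python A returns: every region has an 'indexCode' (else KeyError
-- building region_map), every region_map entry has a 'name' (else KeyError computing its path),
-- and the parent-pointer graph of the input is acyclic (else RecursionError). Acyclicity is a
-- property of the input graph alone (pvStep reads only the region dicts, no cache and no paths);
-- a chain is acyclic iff it reaches a root within regions.length + 1 steps, since the codes on a
-- terminating chain are distinct keys of region_map
def Pre_build_region_hierarchy (regions : List (List (String × String))) : Prop :=
  (∀ r ∈ regions, (pvRGet r "indexCode").isSome) ∧
  (∀ kv ∈ (pvRegionMap regions).items, (pvRGet kv.2 "name").isSome) ∧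
  (∀ r ∈ regions,
    pvReachesRoot (pvRegionMap regions) (regions.length + 1) ((pvRGet r "indexCode").getD "") = true)

instance (regions : List (List (String × String))) : Decidable (Pre_build_region_hierarchy regions) := by
  unfold Pre_build_region_hierarchy; infer_instance

def pvWitness_build_region_hierarchy : (List (List (String × String))) :=
  [[("indexCode", "1"), ("name", "EMEA")],
   [("indexCode", "2"), ("parentIndexCode", "1"), ("name", "a/b")],
   [("indexCode", "3"), ("parentIndexCode", "9"), ("name", "x")]]

def Spec_build_region_hierarchy (regions : List (List (String × String))) (out : List (String × String)) : Prop := out = build_region_hierarchy_alt regions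
instance (regions : List (List (String × String))) (out : List (String × String)) : Decidable (Spec_build_region_hierarchy regions out) := by unfold Spec_build_region_hierarchy; infer_instance

-- ===== CLAIM (what is proved, stated in full; the proofs are below) =====
def Claim_equal_build_region_hierarchy : Prop := ∀ (regions : List (List (String × String))), Dom_build_region_hierarchy regions → Pre_build_region_hierarchy regions → Spec_build_region_hierarchy regions (build_region_hierarchy regions)

-- ===== LEMMAS AND PROOFS =====

theorem pv_reaches_mono (rmap : PySem.Dict String (List (String × String))) :
    ∀ (f : Nat) (c : String), pvReachesRoot rmap f c = true → pvReachesRoot rmap (f+1) c = true := by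
  intro f
  induction f with
  | zero => intro c h; simp [pvReachesRoot] at h
  | succ f ih =>
    intro c h
    simp only [pvReachesRoot] at h ⊢
    cases hs : pvStep rmap c with
    | none => rfl
    | some p => rw [hs] at h; exact ih p h

-- 'b is strictly closer to a root than a'
def pvCloser (rmap : PySem.Dict String (List (String × String))) (a b : String) : Prop :=
  ∀ g : Nat, pvReachesRoot rmap (g+1) a = true → pvReachesRoot rmap g b = true

theorem pv_closer_of_step (rmap : PySem.Dict String (List (String × String))) {c p : String}
    (hs : pvStep rmap c = some p) : pvCloser rmap c p := by
  intro g h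
  simp only [pvReachesRoot, hs] at h
  exact h

theorem pv_closer_trans (rmap : PySem.Dict String (List (String × String))) {a b c : String}
    (h1 : pvCloser rmap a b) (h2 : pvCloser rmap b c) : pvCloser rmap a c := by
  intro g h
  have hb := h1 g h
  cases g with
  | zero => simp [pvReachesRoot] at hb
  | succ g' => exact pv_reaches_mono rmap g' c (h2 g' hb)

theorem pv_no_self_closer (rmap : PySem.Dict String (List (String × String))) (a : String)
    (h : pvCloser rmap a a) : ∀ f, pvReachesRoot rmap f a = false := by
  intro f
  induction f with
  | zero => simp [pvReachesRoot]
  | succ f ih =>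
    by_contra hc
    rw [Bool.not_eq_false] at hc
    have := h f hc
    rw [ih] at this
    exact Bool.false_ne_true this

-- pvGetPath only caches keys of rmap
theorem pvGetPath_inv (rmap : PySem.Dict String (List (String × String))) :
    ∀ (f : Nat) (c : String) (paths : PySem.Dict String String),
    (∀ k, (paths.get? k).isSome → (rmap.get? k).isSome) →
    (∀ k, (((pvGetPath rmap f c paths).2).get? k).isSome → (rmap.get? k).isSome) := by
  intro f
  induction f with
  | zero => intro c paths hp k hk; exact hp k hk
  | succ f ih =>
    intro c paths hp k hk
    cases hc : paths.get? c with
    | some p => simp only [pvGetPath, hc] at hk; exact hp k hk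
    | none =>
      cases hm : rmap.get? c with
      | none => simp only [pvGetPath, hc, hm] at hk; exact hp k hk
      | some r =>
        simp only [pvGetPath, hc, hm] at hk
        by_cases he : r.isEmpty
        · rw [if_pos he] at hk; exact hp k hk
        · rw [if_neg he] at hk
          by_cases hstop : pvRGet r "parentIndexCode" = some "-1" ∨ pvRGet r "parentIndexCode" = none ∨
              pvRGet r "parentIndexCode" = some "" ∨ pvRGet r "parentIndexCode" = some c
          · rw [if_pos hstop] at hk
            simp only [PySem.Dict.get?_insert] at hk
            by_cases hkc : k = c
            · subst hkc; simp [hm]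
            · rw [if_neg hkc] at hk; exact hp k hk
          · rw [if_neg hstop] at hk
            simp only [PySem.Dict.get?_insert] at hk
            by_cases hkc : k = c
            · subst hkc; simp [hm]
            · rw [if_neg hkc] at hk
              exact ih ((pvRGet r "parentIndexCode").getD "") paths hp k hk

-- MAIN: A's memoized recursion equals B's walk-then-unwind, the walk's chain accumulator
-- generalized; pvCloser on chain0 rules out the cycle guard
theorem pv_main (rmap : PySem.Dict String (List (String × String)))
    (hne : ∀ k v, rmap.get? k = some v → v.isEmpty = false) :
    ∀ (f : Nat) (c : String) (paths : PySem.Dict String String) (chain0 : List String),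
    (rmap.get? c).isSome →
    paths.get? c = none →
    pvReachesRoot rmap f c = true →
    (∀ x ∈ chain0, pvCloser rmap x c) →
    (∀ k, (paths.get? k).isSome → (rmap.get? k).isSome) →
    ∃ lc base,
      pvWalk rmap f c chain0 paths = (chain0 ++ lc, base) ∧
      pvGetPath rmap f c paths = lc.reverse.foldl (pvUnwindStep rmap) (base, paths) := by
  intro f
  induction f with
  | zero => intro c paths chain0 _ _ hr _ _; simp [pvReachesRoot] at hr
  | succ f ih =>
    intro c paths chain0 hcm hcu hr hch hinv
    obtain ⟨r, hm⟩ := Option.isSome_iff_exists.mp hcm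
    have hemp : r.isEmpty = false := hne c r hm
    simp only [pvGetPath, pvWalk, hcu, hm, hemp, Bool.false_eq_true, if_false]
    cases hpar : pvRGet r "parentIndexCode" with
    | none =>
      refine ⟨[c], "", by simp, ?_⟩
      simp [pvUnwindStep, hm]
    | some p =>
      by_cases hstop : p = "-1" ∨ p = "" ∨ p = c
      · refine ⟨[c], "", ?_, ?_⟩
        · rcases hstop with h | h | h <;> simp [h]
        · rcases hstop with h | h | h <;> subst h <;> simp [pvUnwindStep, hm]
      · have hstop' := hstop
        push_neg at hstop'
        have hnostop : ¬ ((some p : Option String) = some "-1" ∨ (some p : Option String) = none ∨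
            (some p : Option String) = some "" ∨ (some p : Option String) = some c) := by
          simp [hstop'.1, hstop'.2.1, hstop'.2.2]
        simp only [Option.getD_some]
        rw [if_neg hstop, if_neg hnostop]
        cases hpc : paths.get? p with
        | some bp =>
          -- parent already resolved: one-node chain, base = the cached parent path
          have hpm : (rmap.get? p).isSome := hinv p (by simp [hpc])
          have hstep : pvStep rmap c = some p := by
            simp only [pvStep, hm, hpar]
            rw [if_neg (by push_neg; exact ⟨hstop'.1, hstop'.2.1, hstop'.2.2, Option.isSome_iff_ne_none.mp hpm⟩)]
          have hrp : pvReachesRoot rmap f p = true := by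
            simpa only [pvReachesRoot, hstep] using hr
          obtain ⟨f', rfl⟩ : ∃ f', f = f' + 1 := by
            cases f with
            | zero => simp [pvReachesRoot] at hrp
            | succ f' => exact ⟨f', rfl⟩
          refine ⟨[c], bp, rfl, ?_⟩
          simp only [pvGetPath, hpc]
          simp [pvUnwindStep, hm]
        | none =>
          by_cases hpm : rmap.get? p = none
          · -- parent missing from the map: A's recursive call returns "" without caching
            rw [if_pos hpm]
            have hrec : pvGetPath rmap f p paths = ("", paths) := by
              cases f with
              | zero => rfl
              | succ f' => simp only [pvGetPath, hpc, hpm]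
            refine ⟨[c], "", rfl, ?_⟩
            rw [hrec]
            simp [pvUnwindStep, hm]
          · rw [if_neg hpm]
            have hstep : pvStep rmap c = some p := by
              simp only [pvStep, hm, hpar]
              rw [if_neg (by push_neg; exact ⟨hstop'.1, hstop'.2.1, hstop'.2.2, hpm⟩)]
            have hcp : pvCloser rmap c p := pv_closer_of_step rmap hstep
            have hrp : pvReachesRoot rmap f p = true := by
              simpa only [pvReachesRoot, hstep] using hr
            -- the cycle guard never fires: p is not on the chain walked so far
            have hpnot : p ∉ chain0 ++ [c] := by
              intro hmem
              rcases List.mem_append.mp hmem with h0 | h1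
              · have hself : pvCloser rmap p p := pv_closer_trans rmap (hch p h0) hcp
                rw [pv_no_self_closer rmap p hself f] at hrp
                exact Bool.false_ne_true hrp
              · exact hstop'.2.2 (by simpa using h1)
            rw [if_neg hpnot]
            have hch' : ∀ x ∈ chain0 ++ [c], pvCloser rmap x p := by
              intro x hx
              rcases List.mem_append.mp hx with h0 | h1
              · exact pv_closer_trans rmap (hch x h0) hcp
              · have : x = c := by simpa using h1
                subst this; exact hcp
            obtain ⟨lc', base, hw, hg⟩ :=
              ih p paths (chain0 ++ [c]) (Option.isSome_iff_ne_none.mpr hpm) hpc hrp hch' hinv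
            refine ⟨c :: lc', base, by rw [hw]; simp, ?_⟩
            rw [hg]
            simp only [List.reverse_cons, List.foldl_append, List.foldl_cons, List.foldl_nil]
            simp [pvUnwindStep, hm]

-- a key once present stays present through the region_map fold
theorem pv_get_foldl_some (rs : List (List (String × String))) :
    ∀ (m : PySem.Dict String (List (String × String))) (k : String), (m.get? k).isSome →
    ((rs.foldl (fun m r => m.insert ((pvRGet r "indexCode").getD "") r) m).get? k).isSome := by
  induction rs with
  | nil => intro m k h; exact h
  | cons r rs ih =>
    intro m k h
    simp only [List.foldl_cons]
    apply ih
    simp only [PySem.Dict.get?_insert]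
    by_cases hk : k = (pvRGet r "indexCode").getD ""
    · simp [hk]
    · rw [if_neg hk]; exact h

-- every region's own code is a key of region_map
theorem pv_code_mem (rs : List (List (String × String))) :
    ∀ (m : PySem.Dict String (List (String × String))) (r : List (String × String)), r ∈ rs →
    (((rs.foldl (fun m r => m.insert ((pvRGet r "indexCode").getD "") r) m)).get?
      ((pvRGet r "indexCode").getD "")).isSome := by
  induction rs with
  | nil => intro m r h; simp at h
  | cons r0 rs ih =>
    intro m r h
    simp only [List.foldl_cons]
    rcases List.mem_cons.mp h with h0 | h1
    · subst h0
      exact pv_get_foldl_some rs _ _ (by simp [PySem.Dict.get?_insert_self])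
    · exact ih _ r h1

-- every value of region_map is one of the regions
theorem pv_value_mem (rs : List (List (String × String))) :
    ∀ (m : PySem.Dict String (List (String × String))) (k : String) (v : List (String × String)),
    ((rs.foldl (fun m r => m.insert ((pvRGet r "indexCode").getD "") r) m)).get? k = some v →
    v ∈ rs ∨ m.get? k = some v := by
  induction rs with
  | nil => intro m k v h; exact Or.inr h
  | cons r0 rs ih =>
    intro m k v h
    simp only [List.foldl_cons] at h
    rcases ih _ k v h with h1 | h2
    · exact Or.inl (List.mem_cons_of_mem _ h1)
    · rw [PySem.Dict.get?_insert] at h2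
      by_cases hk : k = (pvRGet r0 "indexCode").getD ""
      · rw [if_pos hk] at h2
        exact Or.inl (List.mem_cons.mpr (Or.inl (Option.some_injective _ h2).symm))
      · rw [if_neg hk] at h2; exact Or.inr h2

-- the two per-region folds agree
theorem pv_fold_eq (rmap : PySem.Dict String (List (String × String))) (F : Nat)
    (hne : ∀ k v, rmap.get? k = some v → v.isEmpty = false) :
    ∀ (rs : List (List (String × String))) (paths : PySem.Dict String String),
    (∀ k, (paths.get? k).isSome → (rmap.get? k).isSome) →
    (∀ r ∈ rs, (rmap.get? ((pvRGet r "indexCode").getD "")).isSome ∧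
      pvReachesRoot rmap F ((pvRGet r "indexCode").getD "") = true) →
    rs.foldl (fun paths r => (pvGetPath rmap F ((pvRGet r "indexCode").getD "") paths).2) paths
    = rs.foldl
        (fun paths r =>
          let code := (pvRGet r "indexCode").getD ""
          match paths.get? code with
          | some _ => paths
          | none =>
            let wb := pvWalk rmap F code [] paths
            (wb.1.reverse.foldl (pvUnwindStep rmap) (wb.2, paths)).2)
        paths := by
  intro rs
  induction rs with
  | nil => intro paths _ _; rfl
  | cons r rs ih =>
    intro paths hinv hall
    obtain ⟨hcm, hrr⟩ := hall r (by simp)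
    simp only [List.foldl_cons]
    have hstepeq :
        (pvGetPath rmap F ((pvRGet r "indexCode").getD "") paths).2
        = (let code := (pvRGet r "indexCode").getD ""
           match paths.get? code with
           | some _ => paths
           | none =>
             let wb := pvWalk rmap F code [] paths
             (wb.1.reverse.foldl (pvUnwindStep rmap) (wb.2, paths)).2) := by
      cases hc : paths.get? ((pvRGet r "indexCode").getD "") with
      | some p =>
        obtain ⟨F', rfl⟩ : ∃ F', F = F' + 1 := by
          cases F with
          | zero => simp [pvReachesRoot] at hrr
          | succ F' => exact ⟨F', rfl⟩
        simp only [pvGetPath, hc]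
      | none =>
        obtain ⟨lc, base, hw, hg⟩ := pv_main rmap hne F _ paths [] hcm hc hrr (by simp) hinv
        simp only [hc, hg, hw, List.nil_append]
    rw [← hstepeq]
    exact ih _ (pvGetPath_inv rmap F _ paths hinv) (fun r' h => hall r' (List.mem_cons_of_mem _ h))

-- ===== VERDICT (by name: the statement is the Claim_ definition above) =====
theorem build_region_hierarchy_spec : Claim_equal_build_region_hierarchy := by
  unfold Claim_equal_build_region_hierarchy
  intro regions _ hpre
  unfold Spec_build_region_hierarchy
  obtain ⟨hidx, _, hacy⟩ := hpre
  have hne : ∀ k v, (pvRegionMap regions).get? k = some v → v.isEmpty = false := by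
    intro k v hv
    rcases pv_value_mem regions PySem.Dict.empty k v hv with h1 | h2
    · have := hidx v h1
      cases v with
      | nil => exact absurd this (by decide)
      | cons a l => rfl
    · simp [PySem.Dict.get?_empty] at h2
  unfold build_region_hierarchy build_region_hierarchy_alt
  refine congrArg PySem.Dict.items ?_
  exact pv_fold_eq (pvRegionMap regions) (regions.length + 1) hne regions PySem.Dict.empty
    (by intro k hk; simp [PySem.Dict.get?_empty] at hk)
    (fun r h => ⟨pv_code_mem regions PySem.Dict.empty r h, hacy r h⟩)
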